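-- pv_equiv track=rewrite | github.com/alphagov/ckanext-datagovuk | ckanext/datagovuk/lib/drupal_password.py | password_base64_encode
-- ===== SOURCE A (Python) =====
-- def password_itoa64():
--     '''For encoding an iteration count as a letter
--     NB it is not the standard base64 alphabet, so not compatible with RFC 3548
--     '''
--     return './0123456789ABCDEFGHIJKLMNOPQRSTUVWXYZabcdefghijklmnopqrstuvwxyz'
--
-- def password_base64_encode(input, count):
--     '''Drupal's own weird version of base64 encoding'''
--     output = ''
--     i = 0
--     itoa64 = password_itoa64()
--     while i < count:
--         value = ord(input[i])
--         i += 1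
--         output += itoa64[value & 0x3f]
--         if i < count:
--             value |= ord(input[i]) << 8
--         output += itoa64[(value >> 6) & 0x3f]
--         if i >= count:
--             break
--         i += 1
--         if i < count:
--             value |= ord(input[i]) << 16
--         output += itoa64[(value >> 12) & 0x3f]
--         if i >= count:
--             break
--         i += 1
--         output += itoa64[(value >> 18) & 0x3f]
--
--     return output
-- ===== SOURCE B (Python) =====
-- ITOA64 = './0123456789ABCDEFGHIJKLMNOPQRSTUVWXYZabcdefghijklmnopqrstuvwxyz'
--
-- def password_base64_encode(input, count):
--     '''Drupal's own weird version of base64 encoding'''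
--     output = []
--     for i in range(0, count, 3):
--         c = input[i:min(i + 3, count)]
--         value = sum(ord(ch) << (8 * j) for j, ch in enumerate(c))
--         for k in range(len(c) + 1):
--             output.append(ITOA64[(value >> (6 * k)) & 0x3f])
--     return ''.join(output)
-- ===== Notes on version B (the rewrite author's own statement) =====
-- stated objective: simpler
-- what changed: Replaces A's single-index while-loop with interleaved increments, conditional ors and two mid-body breaks by a regular traversal over 3-byte chunks: each chunk is folded into one integer and emits exactly len(chunk)+1 characters.
import Mathlib
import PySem

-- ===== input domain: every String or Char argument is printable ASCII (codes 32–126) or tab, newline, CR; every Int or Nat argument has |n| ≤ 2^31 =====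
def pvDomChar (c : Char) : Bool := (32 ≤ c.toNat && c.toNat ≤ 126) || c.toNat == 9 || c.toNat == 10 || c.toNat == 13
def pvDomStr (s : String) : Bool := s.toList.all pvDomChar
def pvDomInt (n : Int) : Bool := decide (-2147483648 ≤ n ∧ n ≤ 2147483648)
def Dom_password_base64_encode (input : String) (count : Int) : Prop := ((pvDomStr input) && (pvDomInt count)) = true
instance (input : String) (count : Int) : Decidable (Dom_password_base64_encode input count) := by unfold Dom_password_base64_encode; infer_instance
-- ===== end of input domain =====

-- B replaces A's single-index while-loop with mid-body breaks by a regular chunked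
-- traversal (3-byte groups, one value per chunk, len(chunk)+1 output characters);
-- objective: simpler. Equality of the RETURN value is what is proved.

-- ===== PORT A =====
def pvItoa64 : List Char :=
  "./0123456789ABCDEFGHIJKLMNOPQRSTUVWXYZabcdefghijklmnopqrstuvwxyz".toList

-- literal port of A's while-loop; xs.getD is input[i], in range whenever i < count ≤ len(input)
-- (Pre_ excludes the IndexError case), itoa64 indices are & 0x3f so always in range
def pvALoop (xs : List Char) (count : Int) (i : Nat) (output : List Char) : List Char :=
  if _h : (i : Int) < count then
    let value := (xs.getD i ' ').toNat
    let output := output ++ [pvItoa64.getD (value &&& 0x3f) ' ']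
    let value := if ((i + 1 : Nat) : Int) < count then value ||| (xs.getD (i + 1) ' ').toNat <<< 8 else value
    let output := output ++ [pvItoa64.getD ((value >>> 6) &&& 0x3f) ' ']
    if ((i + 1 : Nat) : Int) ≥ count then output
    else
      let value := if ((i + 2 : Nat) : Int) < count then value ||| (xs.getD (i + 2) ' ').toNat <<< 16 else value
      let output := output ++ [pvItoa64.getD ((value >>> 12) &&& 0x3f) ' ']
      if ((i + 2 : Nat) : Int) ≥ count then output
      else
        pvALoop xs count (i + 3) (output ++ [pvItoa64.getD ((value >>> 18) &&& 0x3f) ' '])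
  else output
termination_by (count - i).toNat
decreasing_by omega

def password_base64_encode (input : String) (count : Int) : String :=
  String.ofList (pvALoop input.toList count 0 [])

-- ===== PORT B =====
-- literal port of Source B: c = input[i:min(i+3,count)]; value = sum(ord(ch) << 8j);
-- then len(c)+1 characters itoa64[(value >> 6k) & 0x3f]
def pvBChunk (xs : List Char) (count : Int) (i : Int) : List Char :=
  let c := PySem.List.slice xs (some i) (some (min (i + 3) count))
  let value := ((PySem.List.enumerate c).map (fun p => p.2.toNat <<< (8 * p.1).toNat)).sum
  (List.range (c.length + 1)).map (fun k => pvItoa64.getD ((value >>> (6 * k)) &&& 0x3f) ' ')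

def password_base64_encode_alt (input : String) (count : Int) : String :=
  String.ofList ((PySem.List.pyRange 0 count 3).foldl
    (fun out i => out ++ pvBChunk input.toList count i) [])

-- ===== PRECONDITION & SPEC =====
-- A raises IndexError when count exceeds the length of input; Pre_ excludes exactly that.
def Pre_password_base64_encode (input : String) (count : Int) : Prop :=
  count ≤ (input.toList.length : Int)
instance (input : String) (count : Int) : Decidable (Pre_password_base64_encode input count) := by
  unfold Pre_password_base64_encode; infer_instance

def pvWitness_password_base64_encode : String × Int := ("abcd", 4)

def Spec_password_base64_encode (input : String) (count : Int) (out : String) : Prop :=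
  out = password_base64_encode_alt input count
instance (input : String) (count : Int) (out : String) : Decidable (Spec_password_base64_encode input count out) := by
  unfold Spec_password_base64_encode; infer_instance

-- ===== CLAIM (what is proved, stated in full; the proofs are below) =====
def Claim_equal_password_base64_encode : Prop := ∀ (input : String) (count : Int), Dom_password_base64_encode input count → Pre_password_base64_encode input count → Spec_password_base64_encode input count (password_base64_encode input count)

-- ===== LEMMAS AND PROOFS =====

lemma pvRange3_nil (a b : Int) (h : b ≤ a) : PySem.List.pyRange a b 3 = [] := by
  rw [PySem.List.pyRange_of_pos a b (by norm_num)]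
  simp [show ¬ a < b by omega]

lemma pvRange3_cons (a b : Int) (h : a < b) :
    PySem.List.pyRange a b 3 = a :: PySem.List.pyRange (a + 3) b 3 := by
  rw [PySem.List.pyRange_of_pos a b (by norm_num),
      PySem.List.pyRange_of_pos (a + 3) b (by norm_num)]
  have hn : (if a < b then ((b - a + 3 - 1) / 3).toNat else 0)
      = (if a + 3 < b then ((b - (a + 3) + 3 - 1) / 3).toNat else 0) + 1 := by
    split_ifs <;> omega
  rw [hn, List.range_succ_eq_map]
  simp only [List.map_cons, List.map_map]
  refine List.cons_eq_cons.mpr ⟨by push_cast; ring, ?_⟩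
  apply List.map_congr_left
  intro k _
  simp only [Function.comp_apply]
  push_cast
  ring

lemma pvAnd63 (x : Nat) : x &&& 0x3f = x % 64 := by
  have := Nat.and_two_pow_sub_one_eq_mod x 6
  norm_num at this
  exact this

lemma pvLorLow {x : Nat} (y k : Nat) (h : x < 2 ^ k) : x ||| y <<< k = x + y <<< k := by
  rw [Nat.lor_comm, ← Nat.shiftLeft_add_eq_or_of_lt h y, Nat.add_comm]

-- one chunk of B, spelled out for the three possible chunk lengths
set_option maxRecDepth 8192 in
lemma pvChunk_eq (xs : List Char) (count : Int) (i : Nat)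
    (hi : (i : Int) < count) (hlen : count ≤ (xs.length : Int)) :
    pvBChunk xs count i =
      if h1 : count = (i : Int) + 1 then
        [pvItoa64.getD ((xs[i]'(by omega)).toNat % 64) ' ',
         pvItoa64.getD ((xs[i]'(by omega)).toNat / 64 % 64) ' ']
      else if h2 : count = (i : Int) + 2 then
        (let v := (xs[i]'(by omega)).toNat + (xs[i+1]'(by omega)).toNat * 256
         [pvItoa64.getD (v % 64) ' ', pvItoa64.getD (v / 64 % 64) ' ',
          pvItoa64.getD (v / 4096 % 64) ' '])
      else
        (let v := (xs[i]'(by omega)).toNat + (xs[i+1]'(by omega)).toNat * 256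
            + (xs[i+2]'(by omega)).toNat * 65536
         [pvItoa64.getD (v % 64) ' ', pvItoa64.getD (v / 64 % 64) ' ',
          pvItoa64.getD (v / 4096 % 64) ' ', pvItoa64.getD (v / 262144 % 64) ' ']) := by
  unfold pvBChunk
  split_ifs with h1 h2
  · have hc : PySem.List.slice xs (some (i : Int)) (some (min ((i : Int) + 3) count))
        = [xs[i]'(by omega)] := by
      rw [show min ((i : Int) + 3) count = ((i : Nat) : Int) + ((1 : Nat) : Int) by push_cast; omega,
          PySem.List.slice_natCast_add (n := 1),
          List.drop_eq_getElem_cons (show i < xs.length by omega)]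
      rfl
    rw [hc]
    simp only [PySem.List.enumerate_cons, PySem.List.enumerate_nil, List.map_cons, List.map_nil,
      List.sum_cons, List.sum_nil, List.length_cons, List.length_nil]
    norm_num [List.range_succ, Nat.shiftRight_eq_div_pow, Nat.shiftLeft_eq, pvAnd63,
      Nat.div_div_eq_div_mul, Nat.add_assoc, show Int.toNat 0 = 0 from rfl]
  · have hc : PySem.List.slice xs (some (i : Int)) (some (min ((i : Int) + 3) count))
        = [xs[i]'(by omega), xs[i+1]'(by omega)] := by
      rw [show min ((i : Int) + 3) count = ((i : Nat) : Int) + ((2 : Nat) : Int) by push_cast; omega,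
          PySem.List.slice_natCast_add (n := 2),
          List.drop_eq_getElem_cons (show i < xs.length by omega),
          List.take_succ_cons,
          List.drop_eq_getElem_cons (show i + 1 < xs.length by omega)]
      rfl
    rw [hc]
    simp only [PySem.List.enumerate_cons, PySem.List.enumerate_nil, List.map_cons, List.map_nil,
      List.sum_cons, List.sum_nil, List.length_cons, List.length_nil]
    norm_num [List.range_succ, Nat.shiftRight_eq_div_pow, Nat.shiftLeft_eq, pvAnd63,
      Nat.div_div_eq_div_mul, Nat.add_assoc,
      show Int.toNat 0 = 0 from rfl, show Int.toNat 8 = 8 from rfl]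
  · have hc : PySem.List.slice xs (some (i : Int)) (some (min ((i : Int) + 3) count))
        = [xs[i]'(by omega), xs[i+1]'(by omega), xs[i+2]'(by omega)] := by
      rw [show min ((i : Int) + 3) count = ((i : Nat) : Int) + ((3 : Nat) : Int) by push_cast; omega,
          PySem.List.slice_natCast_add (n := 3),
          List.drop_eq_getElem_cons (show i < xs.length by omega),
          List.take_succ_cons,
          List.drop_eq_getElem_cons (show i + 1 < xs.length by omega),
          List.take_succ_cons,
          List.drop_eq_getElem_cons (show i + 2 < xs.length by omega)]
      rfl
    rw [hc]
    simp only [PySem.List.enumerate_cons, PySem.List.enumerate_nil, List.map_cons, List.map_nil,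
      List.sum_cons, List.sum_nil, List.length_cons, List.length_nil]
    norm_num [List.range_succ, Nat.shiftRight_eq_div_pow, Nat.shiftLeft_eq, pvAnd63,
      Nat.div_div_eq_div_mul, Nat.add_assoc,
      show Int.toNat 0 = 0 from rfl, show Int.toNat 8 = 8 from rfl, show Int.toNat 16 = 16 from rfl]

set_option maxRecDepth 8192 in
lemma pvLoop_eq (xs : List Char) (count : Int) (hlen : count ≤ (xs.length : Int))
    (hch : ∀ ch ∈ xs, ch.toNat < 256) :
    ∀ (n : Nat) (i : Nat) (out : List Char), (count - i).toNat ≤ n →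
      pvALoop xs count i out
        = (PySem.List.pyRange i count 3).foldl (fun o j => o ++ pvBChunk xs count j) out := by
  intro n
  induction n with
  | zero =>
    intro i out hfuel
    rw [pvALoop, pvRange3_nil _ _ (by omega)]
    simp [show ¬ ((i : Int) < count) by omega]
  | succ n ih =>
    intro i out hfuel
    by_cases hi : (i : Int) < count
    · have hix : i < xs.length := by omega
      have ha : (xs.getD i ' ') = xs[i] := List.getD_eq_getElem xs ' ' hix
      have hab : (xs[i]'hix).toNat < 256 := hch _ (List.getElem_mem hix)
      rw [pvALoop, pvRange3_cons _ _ hi, List.foldl_cons,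
          pvChunk_eq xs count i hi hlen]
      simp only [dif_pos hi]
      by_cases h1 : count = (i : Int) + 1
      · rw [pvRange3_nil _ _ (by omega)]
        simp only [List.foldl_nil, dif_pos h1, ha]
        split_ifs <;> try omega
        simp [pvAnd63, Nat.shiftRight_eq_div_pow]
      · have hix1 : i + 1 < xs.length := by omega
        have hb : (xs.getD (i + 1) ' ') = xs[i+1] := List.getD_eq_getElem xs ' ' hix1
        have hbb : (xs[i+1]'hix1).toNat < 256 := hch _ (List.getElem_mem hix1)
        have hv1 : (xs[i]'hix).toNat ||| (xs[i+1]'hix1).toNat <<< 8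
            = (xs[i]'hix).toNat + (xs[i+1]'hix1).toNat * 256 := by
          rw [pvLorLow _ 8 (by omega)]
          norm_num [Nat.shiftLeft_eq]
        by_cases h2 : count = (i : Int) + 2
        · rw [pvRange3_nil _ _ (by omega)]
          have hm0 : (xs[i]'hix).toNat % 64
              = ((xs[i]'hix).toNat + (xs[i+1]'hix1).toNat * 256) % 64 := by omega
          simp only [List.foldl_nil, dif_neg h1, dif_pos h2, ha, hb]
          split_ifs <;>
            first
              | omega
              | simp [hv1, hm0, pvAnd63, Nat.shiftRight_eq_div_pow, Nat.div_div_eq_div_mul]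
        · have hix2 : i + 2 < xs.length := by omega
          have hc : (xs.getD (i + 2) ' ') = xs[i+2] := List.getD_eq_getElem xs ' ' hix2
          have hcb : (xs[i+2]'hix2).toNat < 256 := hch _ (List.getElem_mem hix2)
          have hv2 : ((xs[i]'hix).toNat + (xs[i+1]'hix1).toNat * 256) ||| (xs[i+2]'hix2).toNat <<< 16
              = (xs[i]'hix).toNat + (xs[i+1]'hix1).toNat * 256 + (xs[i+2]'hix2).toNat * 65536 := by
            rw [pvLorLow _ 16 (by omega)]
            norm_num [Nat.shiftLeft_eq]
          have hm0 : (xs[i]'hix).toNat % 64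
              = ((xs[i]'hix).toNat + (xs[i+1]'hix1).toNat * 256 + (xs[i+2]'hix2).toNat * 65536) % 64 := by
            omega
          have hm1 : ((xs[i]'hix).toNat + (xs[i+1]'hix1).toNat * 256) / 64 % 64
              = ((xs[i]'hix).toNat + (xs[i+1]'hix1).toNat * 256 + (xs[i+2]'hix2).toNat * 65536) / 64 % 64 := by
            omega
          simp only [dif_neg h1, dif_neg h2, ha, hb, hc]
          split_ifs <;> try omega
          rw [hv1, hv2, ih (i + 3) _ (by omega),
              show ((i + 3 : Nat) : Int) = (i : Int) + 3 by omega]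
          congr 1
          simp [hm0, hm1, pvAnd63, Nat.shiftRight_eq_div_pow, Nat.div_div_eq_div_mul, List.append_assoc]
    · rw [pvALoop, pvRange3_nil _ _ (by omega)]
      simp [hi]

-- ===== VERDICT (by name: the statement is the Claim_ definition above) =====
theorem password_base64_encode_spec : Claim_equal_password_base64_encode := by
  intro input count hdom hpre
  unfold Spec_password_base64_encode password_base64_encode password_base64_encode_alt
  have hch : ∀ ch ∈ input.toList, ch.toNat < 256 := by
    intro ch hmem
    have h1 : pvDomStr input = true := by
      unfold Dom_password_base64_encode at hdom
      exact ((Bool.and_eq_true _ _).mp hdom).1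
    unfold pvDomStr at h1
    have := (List.all_eq_true.mp h1) ch hmem
    unfold pvDomChar at this
    simp only [Bool.or_eq_true, Bool.and_eq_true, decide_eq_true_eq, beq_iff_eq] at this
    omega
  have h := pvLoop_eq input.toList count hpre hch (count - 0).toNat 0 [] (by omega)
  rw [h]
  norm_num
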